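-- pv_equiv track=rewrite | github.com/Fransandi/Advent-of-Code-Python-Solutions | 2021/solutions/day19.py | get_possible_locations
-- ===== SOURCE A (Python) =====
-- from itertools import permutations
--
-- def get_possible_locations(reports):
--     possible_locations = []
--     x_report = [report[0] for report in reports]
--     y_report = [report[1] for report in reports]
--     z_report = [report[2] for report in reports]
--
--     # Look for all possible directions in all dimensions (24 possibilities)
--     for x, y, z in list(permutations([x_report, y_report, z_report])):
--         for temp_x in [x, get_opposite_array(x)]:
--             for temp_y in [y, get_opposite_array(y)]:
--                 for temp_z in [z, get_opposite_array(z)]: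
--                     possible_locations.append([(x, y, z) for x, y, z in zip(temp_x, temp_y, temp_z)])
--
--     return possible_locations
--
-- def get_opposite_array(nums): return [(num * -1) for num in nums]
-- ===== SOURCE B (Python) =====
-- def get_possible_locations(reports):
--     # All ways to pick one axis index and keep the rest in order
--     def selections(axes):
--         if not axes:
--             return []
--         head, tail = axes[0], axes[1:]
--         return [(head, tail)] + [(p, [head] + rest) for p, rest in selections(tail)]
--
--     # Permutations in lexicographic (itertools) order, built recursively
--     def perms(axes):
--         if not axes:
--             return [[]]
--         return [[p] + q for p, rest in selections(axes) for q in perms(rest)]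
--
--     result = []
--     for p in perms([0, 1, 2]):
--         base = [(r[p[0]], r[p[1]], r[p[2]]) for r in reports]
--         # grow the sign variants by doubling: append a flipped copy of
--         # everything so far, axis by axis (z, then y, then x)
--         block = [base]
--         for flip in (lambda t: (t[0], t[1], -t[2]),
--                      lambda t: (t[0], -t[1], t[2]),
--                      lambda t: (-t[0], t[1], t[2])):
--             block = block + [[flip(t) for t in pts] for pts in block]
--         result.extend(block)
--     return result
-- ===== Notes on version B (the rewrite author's own statement) =====
-- stated objective: alternative
-- what changed: B replaces A's column split + itertools.permutations + nested sign loops + zip reassembly by a recursive pick-one-axis permutation generator and a doubling scheme that builds the 8 sign variants per permutation by repeatedly appending an axis-flipped copy of the block built so far.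
import Mathlib
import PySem

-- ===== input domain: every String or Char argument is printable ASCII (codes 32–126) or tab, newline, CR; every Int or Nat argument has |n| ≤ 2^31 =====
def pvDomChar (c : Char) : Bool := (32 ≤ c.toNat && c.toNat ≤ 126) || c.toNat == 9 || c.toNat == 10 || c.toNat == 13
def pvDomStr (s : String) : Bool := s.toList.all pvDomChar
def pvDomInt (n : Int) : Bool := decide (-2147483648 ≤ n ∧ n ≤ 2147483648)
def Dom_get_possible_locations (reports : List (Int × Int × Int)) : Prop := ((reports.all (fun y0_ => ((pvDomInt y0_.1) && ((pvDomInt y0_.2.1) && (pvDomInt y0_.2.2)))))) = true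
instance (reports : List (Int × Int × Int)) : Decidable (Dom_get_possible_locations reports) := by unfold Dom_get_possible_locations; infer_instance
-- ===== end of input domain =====

-- B drops itertools and the column split: it generates axis permutations by structural
-- recursion (pick-one selections) and grows the 8 sign variants of each permuted list by
-- doubling the block with a flipped copy, axis by axis (objective: alternative decomposition).

-- ===== PORT A =====
-- get_opposite_array(nums)
def pvOpp (nums : List Int) : List Int := nums.map (fun num => num * -1)

-- [(x, y, z) for x, y, z in zip(temp_x, temp_y, temp_z)]
def pvZip3 : List Int → List Int → List Int → List (Int × Int × Int)
  | a :: as, b :: bs, c :: cs => (a, b, c) :: pvZip3 as bs cs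
  | _, _, _ => []

def get_possible_locations (reports : List (Int × Int × Int)) : List (List (Int × Int × Int)) :=
  let x_report := reports.map (fun report => report.1)
  let y_report := reports.map (fun report => report.2.1)
  let z_report := reports.map (fun report => report.2.2)
  -- list(permutations([x_report, y_report, z_report])) in itertools order
  let perms : List (List Int × List Int × List Int) :=
    [(x_report, y_report, z_report), (x_report, z_report, y_report),
     (y_report, x_report, z_report), (y_report, z_report, x_report),
     (z_report, x_report, y_report), (z_report, y_report, x_report)]
  perms.foldl (fun acc xyz =>
    [xyz.1, pvOpp xyz.1].foldl (fun acc tx =>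
      [xyz.2.1, pvOpp xyz.2.1].foldl (fun acc ty =>
        [xyz.2.2, pvOpp xyz.2.2].foldl (fun acc tz =>
          acc ++ [pvZip3 tx ty tz]) acc) acc) acc) []

-- ===== PORT B =====
-- selections(axes): all ways to pick one element, keeping the rest in order
def pvSelections : List Int → List (Int × List Int)
  | [] => []
  | head :: tail => (head, tail) :: (pvSelections tail).map (fun pr => (pr.1, head :: pr.2))

-- perms(axes), recursion bounded by the list length (each selection remainder is shorter)
def pvPermsF : Nat → List Int → List (List Int)
  | _, [] => [[]]
  | 0, _ :: _ => []            -- unreachable: fuel = length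
  | n + 1, axes@(_ :: _) =>
      (pvSelections axes).flatMap (fun pr => (pvPermsF n pr.2).map (fun q => pr.1 :: q))

def pvPerms (axes : List Int) : List (List Int) := pvPermsF axes.length axes

-- r[p[k]] for a length-3 tuple r; p always has length 3 here
def pvSel (r : Int × Int × Int) (i : Int) : Int :=
  if i = 0 then r.1 else if i = 1 then r.2.1 else r.2.2

def pvFlipZ (t : Int × Int × Int) : Int × Int × Int := (t.1, t.2.1, -t.2.2)
def pvFlipY (t : Int × Int × Int) : Int × Int × Int := (t.1, -t.2.1, t.2.2)
def pvFlipX (t : Int × Int × Int) : Int × Int × Int := (-t.1, t.2.1, t.2.2)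

def get_possible_locations_alt (reports : List (Int × Int × Int)) : List (List (Int × Int × Int)) :=
  (pvPerms [0, 1, 2]).foldl (fun result p =>
    let base := reports.map (fun r => (pvSel r (p.getD 0 0), pvSel r (p.getD 1 0), pvSel r (p.getD 2 0)))
    let block := [base]
    let block := block ++ block.map (fun pts => pts.map pvFlipZ)
    let block := block ++ block.map (fun pts => pts.map pvFlipY)
    let block := block ++ block.map (fun pts => pts.map pvFlipX)
    result ++ block) []

-- ===== PRECONDITION & SPEC =====
def Spec_get_possible_locations (reports : List (Int × Int × Int)) (out : List (List (Int × Int × Int))) : Prop := out = get_possible_locations_alt reports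
instance (reports : List (Int × Int × Int)) (out : List (List (Int × Int × Int))) : Decidable (Spec_get_possible_locations reports out) := by unfold Spec_get_possible_locations; infer_instance

-- ===== CLAIM (what is proved, stated in full; the proofs are below) =====
def Claim_equal_get_possible_locations : Prop := ∀ (reports : List (Int × Int × Int)), Dom_get_possible_locations reports → Spec_get_possible_locations reports (get_possible_locations reports)

-- ===== LEMMAS AND PROOFS =====

-- zipping three maps over the same list is one map producing the triple
theorem pvZip3_map (f g h : (Int × Int × Int) → Int) (l : List (Int × Int × Int)) :
    pvZip3 (l.map f) (l.map g) (l.map h) = l.map (fun r => (f r, g r, h r)) := by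
  induction l with
  | nil => rfl
  | cons a t ih => simp [pvZip3, ih]

theorem pvOpp_map (f : (Int × Int × Int) → Int) (l : List (Int × Int × Int)) :
    pvOpp (l.map f) = l.map (fun r => f r * -1) := by
  simp [pvOpp]

-- ===== VERDICT (by name: the statement is the Claim_ definition above) =====
theorem get_possible_locations_spec : Claim_equal_get_possible_locations := by
  intro reports _
  unfold Spec_get_possible_locations get_possible_locations get_possible_locations_alt
  simp only [pvPerms, pvPermsF, pvSelections, List.length, List.flatMap, List.map,
    List.foldl, List.flatten, List.append_eq, List.map_map, pvOpp_map, pvZip3_map, pvSel]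
  norm_num [pvFlipX, pvFlipY, pvFlipZ]
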